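-- pv_equiv track=rewrite | github.com/JiseungHong/SYCON-Bench | false-presuppositions-setting/evaluate_oscillate.py | calculate_nof
-- ===== SOURCE A (Python) =====
-- from typing import List, Dict, Any, Tuple
--
-- def calculate_nof(alignments: List[bool]) -> int:
--     """
--     Calculate Number of Flips (NoF) - How many times the alignment changes
--
--     Args:
--         alignments (List[bool]): List of alignment results (True for identified, False for not identified)
--
--     Returns:
--         int: Number of flips
--     """
--     if not alignments or len(alignments) < 2:
--         return 0
--
--     nof = 0
--     # Start with the first value
--     prev = alignments[0]
--
--     # Count changes
--     for current in alignments[1:]: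
--         if current != prev:
--             nof += 1
--             prev = current
--
--     return nof
-- ===== SOURCE B (Python) =====
-- from typing import List
--
-- def calculate_nof(alignments: List[bool]) -> int:
--     """
--     Calculate Number of Flips (NoF) by divide and conquer: split the list in
--     half, count flips in each half recursively, and add one if the alignment
--     changes across the boundary.
--     """
--     n = len(alignments)
--     if n < 2:
--         return 0
--     mid = n // 2
--     left, right = alignments[:mid], alignments[mid:]
--     return calculate_nof(left) + calculate_nof(right) + (left[-1] != right[0])
-- ===== Notes on version B (the rewrite author's own statement) =====
-- stated objective: alternative
-- what changed: B replaces A's single linear prev/current scan by a divide-and-conquer recursion: split the list in half, recursively count flips in each half, and add one if the two halves disagree at the boundary.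
import Mathlib
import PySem

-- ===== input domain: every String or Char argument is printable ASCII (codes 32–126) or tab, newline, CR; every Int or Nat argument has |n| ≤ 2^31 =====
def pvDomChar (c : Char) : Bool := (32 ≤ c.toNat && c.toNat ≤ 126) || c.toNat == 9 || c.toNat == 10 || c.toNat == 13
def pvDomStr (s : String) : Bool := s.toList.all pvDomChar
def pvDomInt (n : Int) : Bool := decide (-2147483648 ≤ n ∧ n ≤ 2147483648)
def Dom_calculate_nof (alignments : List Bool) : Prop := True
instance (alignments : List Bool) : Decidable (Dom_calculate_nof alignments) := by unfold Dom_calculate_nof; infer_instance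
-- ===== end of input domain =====

-- B replaces A's linear prev/current scan by divide and conquer: count flips in each half and add the boundary flip.

-- ===== PORT A =====
-- the 'for current in alignments[1:]' loop with state (nof, prev)
def pvLoopA (nof : Int) (prev : Bool) : List Bool → Int
  | [] => nof
  | current :: rest =>
    if current ≠ prev then pvLoopA (nof + 1) current rest
    else pvLoopA nof prev rest

def calculate_nof (alignments : List Bool) : Int :=
  match alignments with
  | [] => 0
  | a :: rest => if alignments.length < 2 then 0 else pvLoopA 0 a rest

-- ===== PORT B =====
-- divide and conquer on the two slices alignments[:mid] / alignments[mid:];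
-- left[-1] / right[0] are always in range (both halves nonempty when n ≥ 2),
-- rendered with getLast?/head? and .getD false
def calculate_nof_alt (alignments : List Bool) : Int :=
  if h : alignments.length < 2 then 0
  else
    calculate_nof_alt (alignments.take (alignments.length / 2)) +
    calculate_nof_alt (alignments.drop (alignments.length / 2)) +
      (if (alignments.take (alignments.length / 2)).getLast?.getD false
          ≠ (alignments.drop (alignments.length / 2)).head?.getD false then 1 else 0)
termination_by alignments.length
decreasing_by
  · simp only [List.length_take]; omega
  · simp only [List.length_drop]; omega

-- ===== PRECONDITION & SPEC =====
def Spec_calculate_nof (alignments : List Bool) (out : Int) : Prop := out = calculate_nof_alt alignments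
instance (alignments : List Bool) (out : Int) : Decidable (Spec_calculate_nof alignments out) := by unfold Spec_calculate_nof; infer_instance

-- ===== CLAIM =====
def Claim_equal_calculate_nof : Prop := ∀ (alignments : List Bool), Dom_calculate_nof alignments → Spec_calculate_nof alignments (calculate_nof alignments)

-- ===== LEMMAS AND PROOFS =====
-- number of adjacent flips, the common reference value
def pvFlips : List Bool → Int
  | [] => 0
  | [_] => 0
  | a :: b :: r => (if a ≠ b then 1 else 0) + pvFlips (b :: r)

lemma pvLoopA_flips : ∀ (l : List Bool) (prev : Bool) (n : Int),
    pvLoopA n prev l = n + pvFlips (prev :: l) := by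
  intro l
  induction l with
  | nil => intro prev n; simp [pvLoopA, pvFlips]
  | cons c rest ih =>
    intro prev n
    by_cases h : c = prev
    · subst h
      rw [show pvLoopA n c (c :: rest) = pvLoopA n c rest by simp [pvLoopA], ih,
        show pvFlips (c :: c :: rest) = pvFlips (c :: rest) by simp [pvFlips]]
    · rw [show pvLoopA n prev (c :: rest) = pvLoopA (n + 1) c rest by
        simp [pvLoopA, h], ih,
        show pvFlips (prev :: c :: rest) = 1 + pvFlips (c :: rest) by
          simp [pvFlips, show prev ≠ c from fun e => h e.symm]]
      omega

lemma pvFlips_append : ∀ (s t : List Bool), s ≠ [] → t ≠ [] →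
    pvFlips (s ++ t) = pvFlips s + pvFlips t +
      (if s.getLast?.getD false ≠ t.head?.getD false then 1 else 0) := by
  intro s
  induction s with
  | nil => intro t h; exact absurd rfl h
  | cons a s' ih =>
    intro t _ ht
    match s' with
    | [] =>
      match t, ht with
      | b :: r, _ =>
        by_cases hab : a = b <;> simp [pvFlips, hab] <;> omega
    | c :: s'' =>
      have h1 : pvFlips (a :: c :: (s'' ++ t)) =
          (if a ≠ c then 1 else 0) + pvFlips (c :: (s'' ++ t)) := rfl
      have h2 : pvFlips (a :: c :: s'') = (if a ≠ c then 1 else 0) + pvFlips (c :: s'') := rfl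
      have h3 := ih t (by simp) ht
      simp only [List.cons_append] at h3 ⊢
      rw [h1, h3, h2]
      have h4 : (a :: c :: s'').getLast? = (c :: s'').getLast? := by
        simp [List.getLast?_cons_cons]
      rw [h4]
      omega

lemma alt_eq_flips : ∀ (k : Nat) (l : List Bool), l.length ≤ k →
    calculate_nof_alt l = pvFlips l := by
  intro k
  induction k with
  | zero =>
    intro l hl
    match l, hl with
    | [], _ => rw [calculate_nof_alt]; simp [pvFlips]
  | succ k ih =>
    intro l hl
    rw [calculate_nof_alt]
    by_cases h : l.length < 2
    · rw [dif_pos h]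
      match l, h with
      | [], _ => rfl
      | [_], _ => rfl
    · rw [dif_neg h]
      have hn : 2 ≤ l.length := by omega
      have hm1 : 1 ≤ l.length / 2 := by omega
      have hm2 : l.length / 2 < l.length := by omega
      have hL : calculate_nof_alt (l.take (l.length / 2)) = pvFlips (l.take (l.length / 2)) :=
        ih _ (by simp; omega)
      have hR : calculate_nof_alt (l.drop (l.length / 2)) = pvFlips (l.drop (l.length / 2)) :=
        ih _ (by simp; omega)
      rw [hL, hR]
      have hsplit := pvFlips_append (l.take (l.length / 2)) (l.drop (l.length / 2))
        (by rw [← List.length_pos_iff]; simp only [List.length_take]; omega)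
        (by rw [← List.length_pos_iff]; simp only [List.length_drop]; omega)
      rw [List.take_append_drop] at hsplit
      omega

lemma a_eq_flips (l : List Bool) : calculate_nof l = pvFlips l := by
  match l with
  | [] => rfl
  | [a] => rfl
  | a :: b :: rest =>
    show (if (a :: b :: rest).length < 2 then 0 else pvLoopA 0 a (b :: rest)) = _
    rw [if_neg (by simp)]
    rw [pvLoopA_flips]
    omega

-- ===== VERDICT =====
theorem calculate_nof_spec : Claim_equal_calculate_nof := by
  intro alignments _
  unfold Spec_calculate_nof
  rw [a_eq_flips, alt_eq_flips alignments.length alignments le_rfl]
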